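-- pv_equiv track=rewrite | github.com/adamdoherty-arc/Magnus | src/ava/core/multi_agent_enhanced.py | _determine_capabilities
-- ===== SOURCE A (Python) =====
-- from typing import TypedDict, List, Dict, Any, Optional
--
-- def _determine_capabilities(message: str) -> List[str]:
--     """Determine required capabilities from message"""
--     message_lower = message.lower()
--     capabilities = []
--
--     if any(word in message_lower for word in ["price", "market", "quote", "stock price"]):
--         capabilities.append("get_stock_price")
--     if any(word in message_lower for word in ["strategy", "opportunity", "trade", "csp", "cc"]):
--         capabilities.append("strategy_analysis")
--     if any(word in message_lower for word in ["risk", "position", "portfolio"]):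
--         capabilities.append("risk_analysis")
--     if any(word in message_lower for word in ["analyze", "fundamental", "technical", "sentiment"]):
--         capabilities.append("stock_analysis")
--     if any(word in message_lower for word in ["what", "how", "explain", "tell me about"]):
--         capabilities.append("knowledge_query")
--
--     return capabilities
-- ===== SOURCE B (Python) =====
-- # B: inverted keyword->capability index; one keyword-major scan collects the
-- # matched capabilities in a set, then the result is rebuilt in canonical order.
-- _KEYWORD_TO_CAP = {
--     "price": "get_stock_price", "market": "get_stock_price",
--     "quote": "get_stock_price", "stock price": "get_stock_price",
--     "strategy": "strategy_analysis", "opportunity": "strategy_analysis",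
--     "trade": "strategy_analysis", "csp": "strategy_analysis",
--     "cc": "strategy_analysis",
--     "risk": "risk_analysis", "position": "risk_analysis",
--     "portfolio": "risk_analysis",
--     "analyze": "stock_analysis", "fundamental": "stock_analysis",
--     "technical": "stock_analysis", "sentiment": "stock_analysis",
--     "what": "knowledge_query", "how": "knowledge_query",
--     "explain": "knowledge_query", "tell me about": "knowledge_query",
-- }
-- _CAP_ORDER = ["get_stock_price", "strategy_analysis", "risk_analysis",
--               "stock_analysis", "knowledge_query"]
--
-- def _determine_capabilities(message: str):
--     message_lower = message.lower()
--     matched = set()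
--     for word, cap in _KEYWORD_TO_CAP.items():
--         if word in message_lower:
--             matched.add(cap)
--     return [cap for cap in _CAP_ORDER if cap in matched]
-- ===== Notes on version B (the rewrite author's own statement) =====
-- stated objective: alternative
-- what changed: Inverts the data: a keyword-to-capability index is scanned keyword-major once, matched capabilities are accumulated in a set, and the output is rebuilt by filtering a canonical order list against that set, instead of A's per-capability unrolled any()-branches with direct appends.
import Mathlib
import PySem

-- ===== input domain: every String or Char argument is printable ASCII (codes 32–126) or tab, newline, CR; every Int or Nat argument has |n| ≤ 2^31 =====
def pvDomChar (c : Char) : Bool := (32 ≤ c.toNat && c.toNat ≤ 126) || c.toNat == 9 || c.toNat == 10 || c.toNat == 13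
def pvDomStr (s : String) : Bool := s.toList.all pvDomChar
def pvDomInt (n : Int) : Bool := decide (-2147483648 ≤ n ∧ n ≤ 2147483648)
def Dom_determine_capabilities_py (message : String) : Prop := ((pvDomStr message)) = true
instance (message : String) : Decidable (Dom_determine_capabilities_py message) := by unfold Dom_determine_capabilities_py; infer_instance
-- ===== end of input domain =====

-- B differs from A structurally (inverted keyword index + set + ordered rebuild); return values proved equal.

-- ===== PORT A =====
def determine_capabilities_py (message : String) : List String :=
  let message_lower := PySem.Str.lower message
  let capabilities : List String := []
  let capabilities := if ["price", "market", "quote", "stock price"].any (fun word => PySem.Str.isIn word message_lower) then capabilities ++ ["get_stock_price"] else capabilities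
  let capabilities := if ["strategy", "opportunity", "trade", "csp", "cc"].any (fun word => PySem.Str.isIn word message_lower) then capabilities ++ ["strategy_analysis"] else capabilities
  let capabilities := if ["risk", "position", "portfolio"].any (fun word => PySem.Str.isIn word message_lower) then capabilities ++ ["risk_analysis"] else capabilities
  let capabilities := if ["analyze", "fundamental", "technical", "sentiment"].any (fun word => PySem.Str.isIn word message_lower) then capabilities ++ ["stock_analysis"] else capabilities
  let capabilities := if ["what", "how", "explain", "tell me about"].any (fun word => PySem.Str.isIn word message_lower) then capabilities ++ ["knowledge_query"] else capabilities
  capabilities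

-- ===== PORT B =====
-- inverted index: keyword -> capability (a dict in Source B, iterated in insertion order as items)
def keywordToCap : List (String × String) :=
  [("price", "get_stock_price"), ("market", "get_stock_price"),
   ("quote", "get_stock_price"), ("stock price", "get_stock_price"),
   ("strategy", "strategy_analysis"), ("opportunity", "strategy_analysis"),
   ("trade", "strategy_analysis"), ("csp", "strategy_analysis"),
   ("cc", "strategy_analysis"),
   ("risk", "risk_analysis"), ("position", "risk_analysis"),
   ("portfolio", "risk_analysis"),
   ("analyze", "stock_analysis"), ("fundamental", "stock_analysis"),
   ("technical", "stock_analysis"), ("sentiment", "stock_analysis"),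
   ("what", "knowledge_query"), ("how", "knowledge_query"),
   ("explain", "knowledge_query"), ("tell me about", "knowledge_query")]

def capOrder : List String :=
  ["get_stock_price", "strategy_analysis", "risk_analysis", "stock_analysis", "knowledge_query"]

def determine_capabilities_py_alt (message : String) : List String :=
  let message_lower := PySem.Str.lower message
  let matched : PySem.Set String :=
    keywordToCap.foldl (fun s p => if PySem.Str.isIn p.1 message_lower then PySem.Set.add s p.2 else s) PySem.Set.empty
  capOrder.filter (fun cap => PySem.Set.contains matched cap)

-- ===== PRECONDITION & SPEC =====
def Spec_determine_capabilities_py (message : String) (out : List String) : Prop := out = determine_capabilities_py_alt message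
instance (message : String) (out : List String) : Decidable (Spec_determine_capabilities_py message out) := by unfold Spec_determine_capabilities_py; infer_instance

-- ===== CLAIM (what is proved, stated in full; the proofs are below) =====
def Claim_equal_determine_capabilities_py : Prop := ∀ (message : String), Dom_determine_capabilities_py message → Spec_determine_capabilities_py message (determine_capabilities_py message)

-- ===== LEMMAS AND PROOFS =====

-- membership in the keyword-scan fold = membership in the start set, or some hit keyword maps to it
theorem mem_keyword_fold (l : List (String × String)) (s : PySem.Set String) (ml c : String) :
    c ∈ l.foldl (fun s p => if PySem.Str.isIn p.1 ml then PySem.Set.add s p.2 else s) s ↔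
      c ∈ s ∨ ∃ p ∈ l, PySem.Str.isIn p.1 ml = true ∧ p.2 = c := by
  induction l generalizing s with
  | nil => simp
  | cons p l ih =>
      rw [List.foldl_cons]
      by_cases h : PySem.Str.isIn p.1 ml = true
      · rw [if_pos h, ih]
        simp only [PySem.Set.mem_add, List.mem_cons]
        constructor
        · rintro (⟨hs | he⟩ | ⟨q, hq, hw, hc⟩)
          · exact Or.inl hs
          · exact Or.inr ⟨p, Or.inl rfl, h, he.symm⟩
          · exact Or.inr ⟨q, Or.inr hq, hw, hc⟩
        · rintro (hs | ⟨q, hq | hq, hw, hc⟩)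
          · exact Or.inl (Or.inl hs)
          · exact Or.inl (Or.inr (hq ▸ hc).symm)
          · exact Or.inr ⟨q, hq, hw, hc⟩
      · rw [if_neg h, ih]
        simp only [List.mem_cons]
        constructor
        · rintro (hs | ⟨q, hq, hw, hc⟩)
          · exact Or.inl hs
          · exact Or.inr ⟨q, Or.inr hq, hw, hc⟩
        · rintro (hs | ⟨q, hq | hq, hw, hc⟩)
          · exact Or.inl hs
          · exact absurd (hq ▸ hw) h
          · exact Or.inr ⟨q, hq, hw, hc⟩

-- ===== VERDICT (by name: the statement is the Claim_ definition above) =====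
theorem determine_capabilities_py_spec : Claim_equal_determine_capabilities_py := by
  intro message _
  unfold Spec_determine_capabilities_py determine_capabilities_py determine_capabilities_py_alt
  simp only []
  generalize hml : PySem.Str.lower message = ml
  have key : ∀ c : String,
      PySem.Set.contains
        (keywordToCap.foldl (fun s p => if PySem.Str.isIn p.1 ml then PySem.Set.add s p.2 else s)
          PySem.Set.empty) c
        = decide (∃ p ∈ keywordToCap, PySem.Str.isIn p.1 ml = true ∧ p.2 = c) := by
    intro c
    rw [Bool.eq_iff_iff, PySem.Set.contains_iff, mem_keyword_fold, decide_eq_true_eq]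
    simp [PySem.Set.empty]
  simp only [capOrder, List.filter_cons, List.filter_nil, key]
  simp only [keywordToCap, List.mem_cons, List.not_mem_nil]
  simp only [List.any_cons, List.any_nil, Bool.or_false]
  simp
  split_ifs <;> simp_all
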